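-- pv_equiv track=rewrite | github.com/ayahkashif/Vanity-Plates | Vanity Plates/plates.py | end_w_number
-- ===== SOURCE A (Python) =====
-- def end_w_number(s):
--     index = []
--     for i, c in enumerate(s):
--         if c.isdigit():
--             index.append(i)
--     if index:
--         char = s[0:index[0]]
--         digit = s[index[0]:]
--         if s == char + digit and digit.isdigit() and len(char) >= 2 and digit.startswith("0") == False:
--             return s
--     else:
--         char = s
--         if s == char and len(char) >= 2:
--             return s
-- ===== SOURCE B (Python) =====
-- def end_w_number(s):
--     seen_digit = False
--     for i, c in enumerate(s):
--         if c.isdigit():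
--             if not seen_digit:
--                 if i < 2 or c == '0':
--                     return None
--                 seen_digit = True
--         elif seen_digit:
--             return None
--     return s if len(s) >= 2 else None
-- ===== Notes on version B (the rewrite author's own statement) =====
-- stated objective: alternative
-- what changed: Replaced A's collect-all-digit-indices-into-a-list, slice-at-first-index, re-scan-suffix-with-isdigit approach by a single stateful pass tracking a seen_digit flag with early returns.
import Mathlib
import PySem

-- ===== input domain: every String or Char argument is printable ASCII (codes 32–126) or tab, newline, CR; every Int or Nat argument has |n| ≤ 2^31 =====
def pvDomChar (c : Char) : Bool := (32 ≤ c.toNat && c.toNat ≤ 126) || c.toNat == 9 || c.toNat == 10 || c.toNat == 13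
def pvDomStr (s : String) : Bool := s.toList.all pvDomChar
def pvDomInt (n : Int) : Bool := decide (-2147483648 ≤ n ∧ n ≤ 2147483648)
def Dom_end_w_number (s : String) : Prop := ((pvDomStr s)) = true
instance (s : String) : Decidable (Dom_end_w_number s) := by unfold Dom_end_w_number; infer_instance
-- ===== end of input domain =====

-- B replaces A's collect-digit-indices list + slice + suffix re-scan by a single stateful pass (alternative decomposition, same cost).

-- ===== PORT A =====
def end_w_number (s : String) : Option String :=
  let index : List Int := (PySem.List.enumerate s.toList 0).foldl
    (fun acc p => if PySem.Chars.isdigit p.2 then acc ++ [p.1] else acc) []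
  match index with
  | i0 :: _ =>
      let char := PySem.Str.slice s (some 0) (some i0)
      let digit := PySem.Str.slice s (some i0) none
      if (s == char ++ digit) && PySem.Str.strIsdigit digit
          && decide (2 ≤ PySem.Str.len char)
          && (PySem.Str.startswith digit "0" == false)
      then some s else none
  | [] =>
      if (s == s) && decide (2 ≤ PySem.Str.len s) then some s else none

-- ===== PORT B =====
def goB (s : String) : List (Int × Char) → Bool → Option String
  | [], _ => if decide (2 ≤ PySem.Str.len s) then some s else none
  | (i, c) :: rest, seen =>
      if PySem.Chars.isdigit c then
        if !seen then
          if decide (i < 2) || (c == '0') then none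
          else goB s rest true
        else goB s rest seen
      else if seen then none
      else goB s rest seen

def end_w_number_alt (s : String) : Option String :=
  goB s (PySem.List.enumerate s.toList 0) false

-- ===== PRECONDITION & SPEC =====
def Spec_end_w_number (s : String) (out : Option String) : Prop := out = end_w_number_alt s
instance (s : String) (out : Option String) : Decidable (Spec_end_w_number s out) := by unfold Spec_end_w_number; infer_instance

-- ===== CLAIM (what is proved, stated in full; the proofs are below) =====
def Claim_equal_end_w_number : Prop := ∀ (s : String), Dom_end_w_number s → Spec_end_w_number s (end_w_number s)


-- ===== LEMMAS AND PROOFS =====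

theorem dropWhile_head_false (p : Char → Bool) (l : List Char) (c : Char) (rest : List Char)
    (h : l.dropWhile p = c :: rest) : p c = false := by
  have h2 := List.head_dropWhile_not (p := p) (l := l) (by rw [h]; simp)
  simp only [h, List.head_cons] at h2; exact h2

theorem startswith_zero (c : Char) (rest : List Char) :
    PySem.Chars.startswith (c :: rest) ['0'] = (c == '0') := by
  rcases h : (c == '0') with _|_
  · simp only [Bool.eq_false_iff]; intro hs
    have := (PySem.Chars.startswith_iff _ _).mp hs
    simp [List.cons_prefix_cons] at this
    have hne : c ≠ '0' := by simpa using h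
    exact hne this.symm
  · have : c = '0' := by simpa using h
    subst this
    exact (PySem.Chars.startswith_iff _ _).mpr (by simp [List.cons_prefix_cons])

theorem goB_nodigit (s : String) (l : List Char) (n : Int)
    (h : ∀ c ∈ l, PySem.Chars.isdigit c = false) :
    goB s (PySem.List.enumerate l n) false
      = if decide (2 ≤ PySem.Str.len s) then some s else none := by
  induction l generalizing n with
  | nil => simp [PySem.List.enumerate_nil, goB]
  | cons c cs ih =>
      rw [PySem.List.enumerate_cons]
      have hc := h c (by simp)
      simp only [goB, hc]
      exact ih (n + 1) (fun x hx => h x (List.mem_cons_of_mem _ hx))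

theorem goB_seen (s : String) (l : List Char) (n : Int) :
    goB s (PySem.List.enumerate l n) true
      = if l.all PySem.Chars.isdigit && decide (2 ≤ PySem.Str.len s) then some s else none := by
  induction l generalizing n with
  | nil => simp [PySem.List.enumerate_nil, goB]
  | cons c cs ih =>
      rw [PySem.List.enumerate_cons]
      rcases hc : PySem.Chars.isdigit c with _|_
      · simp [goB, hc]
      · simp only [goB, hc, Bool.not_true, Bool.false_eq_true, if_false]
        rw [ih (n + 1)]
        simp [hc]

theorem goB_skip (s : String) (pre l : List Char) (n : Int)
    (h : ∀ c ∈ pre, PySem.Chars.isdigit c = false) :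
    goB s (PySem.List.enumerate (pre ++ l) n) false
      = goB s (PySem.List.enumerate l (n + pre.length)) false := by
  induction pre generalizing n with
  | nil => simp
  | cons c cs ih =>
      rw [List.cons_append, PySem.List.enumerate_cons]
      have hc := h c (by simp)
      simp only [goB, hc]
      rw [ih (n + 1) (fun x hx => h x (List.mem_cons_of_mem _ hx))]
      have harith : n + 1 + (cs.length : Int) = n + ((cs.length : Int) + 1) := by ring
      simp [List.length_cons, harith]

theorem main_equiv (s : String) : end_w_number s = end_w_number_alt s := by
  unfold end_w_number end_w_number_alt
  set l := s.toList with hl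
  rw [PySem.List.foldl_append_if]
  rcases hd : l.dropWhile (fun c => !PySem.Chars.isdigit c) with _ | ⟨c, rest⟩
  · -- no digit in l
    have hall : ∀ x ∈ l, PySem.Chars.isdigit x = false := by
      intro x hx
      have := List.dropWhile_eq_nil_iff.mp hd x hx
      simpa using this
    have hfil : (PySem.List.enumerate l 0).filter (fun p => PySem.Chars.isdigit p.2) = [] := by
      refine List.filter_eq_nil_iff.mpr ?_
      intro p hp
      rcases (PySem.List.mem_enumerate_iff _ _ _).mp hp with ⟨k, hk, rfl⟩
      simp [hall _ (List.getElem_mem hk)]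
    rw [hfil]
    simp only [List.map_nil, List.nil_append]
    rw [goB_nodigit s l 0 hall]
    simp
  · -- first digit is c, at index pre.length
    have hsplit : l.takeWhile (fun c => !PySem.Chars.isdigit c) ++ (c :: rest) = l := by
      rw [← hd]; exact List.takeWhile_append_dropWhile
    set pre := l.takeWhile (fun c => !PySem.Chars.isdigit c) with hpredef
    have hc : PySem.Chars.isdigit c = true := by
      have := dropWhile_head_false _ _ _ _ hd
      simpa using this
    have hpre : ∀ x ∈ pre, PySem.Chars.isdigit x = false := by
      intro x hx
      have := List.mem_takeWhile_imp hx
      simpa using this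
    -- the digit-index list
    have hfilpre : (PySem.List.enumerate pre 0).filter (fun p => PySem.Chars.isdigit p.2) = [] := by
      refine List.filter_eq_nil_iff.mpr ?_
      intro p hp
      rcases (PySem.List.mem_enumerate_iff _ _ _).mp hp with ⟨k, hk, rfl⟩
      simp [hpre _ (List.getElem_mem hk)]
    have hfil : (PySem.List.enumerate l 0).filter (fun p => PySem.Chars.isdigit p.2)
        = ((pre.length : Int), c) ::
          (PySem.List.enumerate rest ((pre.length : Int) + 1)).filter (fun p => PySem.Chars.isdigit p.2) := by
      rw [← hsplit, PySem.List.enumerate_append, List.filter_append, hfilpre,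
        List.nil_append, PySem.List.enumerate_cons]
      simp [hc]
    rw [hfil]
    simp only [List.map_cons, List.nil_append]
    -- A side slices
    have htake : List.take pre.length l = pre := by rw [← hsplit]; exact List.take_left
    have hdrop : List.drop pre.length l = c :: rest := by rw [← hsplit]; exact List.drop_left
    have hchar : (PySem.Str.slice s (some (pre.length : Int)) none).toList = c :: rest := by
      simp [← hl, PySem.List.slice_from_natCast, hdrop]
    have hchar0 : (PySem.Str.slice s (some 0) (some (pre.length : Int))).toList = pre := by
      simp [← hl, PySem.List.slice_to_natCast, htake]
    have happ : s == PySem.Str.slice s (some 0) (some (pre.length : Int))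
        ++ PySem.Str.slice s (some (pre.length : Int)) none := by
      simp only [beq_iff_eq]
      refine String.toList_inj.mp ?_
      simp [hchar0, hchar, hsplit, ← hl]
    have hlen : PySem.Str.len (PySem.Str.slice s (some 0) (some (pre.length : Int))) = pre.length := by
      have : (PySem.Str.slice s (some 0) (some (pre.length : Int))).toList.length = pre.length := by
        rw [hchar0]
      simpa using this
    have hdig : PySem.Str.strIsdigit (PySem.Str.slice s (some (pre.length : Int)) none)
        = (c :: rest).all PySem.Chars.isdigit := by
      have := hchar
      simp only [PySem.Str.strIsdigit_eq, this]
      simp [PySem.Chars.strIsdigit, hc]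
    have hsw : PySem.Str.startswith (PySem.Str.slice s (some (pre.length : Int)) none) "0"
        = (c == '0') := by
      simp only [PySem.Str.startswith_eq]
      have h0 : ("0" : String).toList = ['0'] := by decide
      rw [hchar, h0, startswith_zero]
    -- B side
    rw [← hsplit, goB_skip s pre (c :: rest) 0 hpre, PySem.List.enumerate_cons]
    simp only [goB, hc, Bool.not_false, if_true, zero_add]
    rw [happ, hdig, hlen, hsw]
    rw [goB_seen s rest ((pre.length : Int) + 1)]
    have hlnat : s.toList.length = pre.length + 1 + rest.length := by
      rw [← hl, ← hsplit]; simp; omega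
    have hslen : PySem.Str.len s = (pre.length : Int) + 1 + (rest.length : Int) := by
      have h2' : PySem.Str.len s = (s.toList.length : Int) := by simp
      rw [h2', hlnat]; push_cast; ring
    rcases h0 : (c == '0') with _|_
    · by_cases h2 : 2 ≤ pre.length
      · have hi : ¬ ((pre.length : Int) < 2) := by omega
        have hs2 : 2 ≤ PySem.Str.len s := by omega
        have hsl : 2 ≤ s.length := by
          have hx : s.length = s.toList.length := by simp
          omega
        simp [hi, hc, h2, hsl]
      · have hi : ((pre.length : Int) < 2) := by omega
        have h2' : ¬ (2 ≤ (pre.length : Int)) := by omega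
        simp [hi, h2']
    · simp

-- ===== VERDICT (by name: the statement is the Claim_ definition above) =====
theorem end_w_number_spec : Claim_equal_end_w_number := by
  intro s _
  unfold Spec_end_w_number
  exact main_equiv s
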